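-- pv_equiv track=rewrite | github.com/OnassisV/Rep_cap_web | core/sincronicas_adapters.py | aplicar_filtro_anio_sync
-- ===== SOURCE A (Python) =====
-- from typing import Any
--
-- def aplicar_filtro_anio_sync(
--     filas: list[dict[str, Any]], anio_param: str,
-- ) -> tuple[list[str], str, list[dict[str, Any]]]:
--     """Aplica selector de anio a la lista de sincronicas."""
--     anios = sorted({str(f.get("anio", "")).strip() for f in filas if str(f.get("anio", "")).strip()}, reverse=True)
--     if not anios:
--         return [], "", []
--     anio_sel = anio_param if anio_param in anios else anios[0]
--     filtradas = [f for f in filas if str(f.get("anio", "")).strip() == anio_sel]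
--     return anios, anio_sel, filtradas
-- ===== SOURCE B (Python) =====
-- def aplicar_filtro_anio_sync(filas, anio_param):
--     """Aplica selector de anio a la lista de sincronicas (group-by index, one pass)."""
--     grupos = {}
--     for f in filas:
--         a = str(f.get("anio", "")).strip()
--         if a:
--             grupos.setdefault(a, []).append(f)
--     anios = sorted(grupos, reverse=True)
--     if not anios:
--         return [], "", []
--     anio_sel = anio_param if anio_param in grupos else anios[0]
--     return anios, anio_sel, grupos[anio_sel]
-- ===== Notes on version B (the rewrite author's own statement) =====
-- stated objective: simpler
-- what changed: Replaces A's distinct-set pass plus a separate filtering scan with a single group-by pass building a dict year -> rows, so the selected group is a direct lookup.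
import Mathlib
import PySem

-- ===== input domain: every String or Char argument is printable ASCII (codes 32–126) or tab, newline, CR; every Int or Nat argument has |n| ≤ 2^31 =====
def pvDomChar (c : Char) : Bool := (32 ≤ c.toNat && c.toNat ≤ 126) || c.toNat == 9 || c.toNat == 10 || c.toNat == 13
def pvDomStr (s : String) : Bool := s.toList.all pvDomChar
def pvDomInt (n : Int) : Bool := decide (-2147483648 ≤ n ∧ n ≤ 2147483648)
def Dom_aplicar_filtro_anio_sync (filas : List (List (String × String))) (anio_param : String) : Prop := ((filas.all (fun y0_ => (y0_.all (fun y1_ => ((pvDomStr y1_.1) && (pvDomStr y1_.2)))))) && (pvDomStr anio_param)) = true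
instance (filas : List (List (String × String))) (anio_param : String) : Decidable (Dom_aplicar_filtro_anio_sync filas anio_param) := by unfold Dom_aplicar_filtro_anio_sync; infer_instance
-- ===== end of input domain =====

-- B groups the rows by stripped year in one pass (dict year -> rows) instead of A's
-- distinct-set pass followed by a separate filtering scan; objective: simpler.

-- shared helper: str(f.get("anio","")).strip() (values are strings, so str() is the identity)
def pvAnio (f : List (String × String)) : String :=
  PySem.Str.strip ((PySem.Dict.mk f).getD "anio" "")

-- ===== PORT A =====
def aplicar_filtro_anio_sync (filas : List (List (String × String))) (anio_param : String) : List String × String × (List (List (String × String))) :=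
  let anios := PySem.List.sorted
    (PySem.Set.ofList ((filas.filter (fun f => pvAnio f != "")).map pvAnio)) (fun x => x) true
  if anios = [] then ([], "", [])
  else
    let anio_sel := if anio_param ∈ anios then anio_param else PySem.List.pyGetD anios 0 ""
    (anios, anio_sel, filas.filter (fun f => pvAnio f == anio_sel))

-- ===== PORT B =====
def aplicar_filtro_anio_sync_alt (filas : List (List (String × String))) (anio_param : String) : List String × String × (List (List (String × String))) :=
  let grupos := filas.foldl
    (fun d f => let a := pvAnio f; if a != "" then d.modify a [] (· ++ [f]) else d)
    PySem.Dict.empty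
  let anios := PySem.List.sorted grupos.keys (fun x => x) true
  if anios = [] then ([], "", [])
  else
    let anio_sel := if grupos.contains anio_param then anio_param else PySem.List.pyGetD anios 0 ""
    (anios, anio_sel, grupos.getD anio_sel [])

-- ===== PRECONDITION & SPEC =====
def Spec_aplicar_filtro_anio_sync (filas : List (List (String × String))) (anio_param : String) (out : List String × String × (List (List (String × String)))) : Prop := out = aplicar_filtro_anio_sync_alt filas anio_param
instance (filas : List (List (String × String))) (anio_param : String) (out : List String × String × (List (List (String × String)))) : Decidable (Spec_aplicar_filtro_anio_sync filas anio_param out) := by unfold Spec_aplicar_filtro_anio_sync; infer_instance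

-- ===== CLAIM (what is proved, stated in full; the proofs are below) =====
def Claim_equal_aplicar_filtro_anio_sync : Prop := ∀ (filas : List (List (String × String))) (anio_param : String), Dom_aplicar_filtro_anio_sync filas anio_param → Spec_aplicar_filtro_anio_sync filas anio_param (aplicar_filtro_anio_sync filas anio_param)

-- ===== LEMMAS AND PROOFS =====

-- B's loop step, named for the lemmas
def pvStep (d : PySem.Dict String (List (List (String × String)))) (f : List (String × String)) : PySem.Dict String (List (List (String × String))) :=
  let a := pvAnio f; if a != "" then d.modify a [] (· ++ [f]) else d

theorem pvKeys_step (d : PySem.Dict String (List (List (String × String)))) (f : List (String × String)) :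
    (pvStep d f).keys = if pvAnio f != "" then PySem.Set.add d.keys (pvAnio f) else d.keys := by
  unfold pvStep
  by_cases h : pvAnio f != ""
  · simp only [h, if_true]
    rw [PySem.Dict.keys_modify]
    by_cases hc : d.contains (pvAnio f)
    · rw [PySem.Dict.keys_insert_of_contains _ _ hc]
      have : pvAnio f ∈ d.keys := (PySem.Dict.contains_iff_mem_keys d _).mp hc
      simp [PySem.Set.add, List.elem_iff, this]
    · rw [PySem.Dict.keys_insert_of_not_contains _ _ (by simpa using hc)]
      have : pvAnio f ∉ d.keys := fun hm => hc ((PySem.Dict.contains_iff_mem_keys d _).mpr hm)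
      simp [PySem.Set.add, List.elem_iff, this]
  · simp [h]

-- keys of the group dict = first occurrences of the non-empty stripped years
theorem pvKeys_foldl (filas : List (List (String × String)))
    (d : PySem.Dict String (List (List (String × String)))) :
    (filas.foldl pvStep d).keys
      = PySem.Set.update d.keys ((filas.filter (fun f => pvAnio f != "")).map pvAnio) := by
  induction filas generalizing d with
  | nil => simp [PySem.Set.update]
  | cons f t ih =>
    rw [List.foldl_cons, ih, List.filter_cons, pvKeys_step]
    by_cases h : pvAnio f != ""
    · rw [if_pos h, if_pos h, List.map_cons]
      simp [PySem.Set.update]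
    · rw [if_neg (by simpa using h), if_neg (by simpa using h)]

-- lookup in the group dict = A's filtering scan
theorem pvGetD_foldl (filas : List (List (String × String)))
    (d : PySem.Dict String (List (List (String × String)))) (c : String) (hc : c ≠ "") :
    (filas.foldl pvStep d).getD c []
      = d.getD c [] ++ filas.filter (fun f => pvAnio f == c) := by
  induction filas generalizing d with
  | nil => simp
  | cons f t ih =>
    rw [List.foldl_cons, ih, List.filter_cons]
    by_cases hf : pvAnio f = c
    · have h1 : pvAnio f != "" := by simp [hf, hc]
      simp only [hf, beq_self_eq_true, if_true]
      rw [show pvStep d f = d.modify (pvAnio f) [] (· ++ [f]) from by simp [pvStep, h1]]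
      rw [hf, PySem.Dict.getD_modify_self]
      simp
    · have h2 : (pvStep d f).getD c [] = d.getD c [] := by
        unfold pvStep
        by_cases h1 : pvAnio f != ""
        · simp only [h1, if_true]
          exact PySem.Dict.getD_modify_of_ne _ _ _ (Ne.symm hf)
        · simp [h1]
      simp [h2, hf]

-- every key of the group dict is a non-empty string
theorem pvMem_keys_ne (filas : List (List (String × String))) (y : String)
    (hy : y ∈ (filas.foldl pvStep PySem.Dict.empty).keys) : y ≠ "" := by
  rw [pvKeys_foldl] at hy
  simp only [PySem.Dict.keys_empty] at hy
  have := (PySem.Set.mem_update _ _ _).mp (by simpa [PySem.Set.update] using hy)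
  rcases this with h | h
  · simp at h
  · rcases List.mem_map.mp h with ⟨f, hf, rfl⟩
    have := List.of_mem_filter hf
    simpa using this

-- ===== VERDICT (by name: the statement is the Claim_ definition above) =====
theorem aplicar_filtro_anio_sync_spec : Claim_equal_aplicar_filtro_anio_sync := by
  intro filas anio_param _
  show _ = _
  unfold aplicar_filtro_anio_sync aplicar_filtro_anio_sync_alt
  have hstep : (fun d f => let a := pvAnio f; if a != "" then d.modify a [] (· ++ [f]) else d) = pvStep := rfl
  rw [hstep]
  have hkeys : (filas.foldl pvStep PySem.Dict.empty).keys
      = PySem.Set.ofList ((filas.filter (fun f => pvAnio f != "")).map pvAnio) := by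
    rw [pvKeys_foldl, PySem.Set.ofList_eq_foldl]
    simp [PySem.Set.update]
  simp only [hkeys]
  set anios := PySem.List.sorted (PySem.Set.ofList ((filas.filter (fun f => pvAnio f != "")).map pvAnio)) (fun x => x) true with hanios
  by_cases hnil : anios = []
  · simp [hnil]
  · simp only [hnil, if_false]
    have hmem : (filas.foldl pvStep PySem.Dict.empty).contains anio_param = true ↔ anio_param ∈ anios := by
      rw [PySem.Dict.contains_iff_mem_keys, hkeys, hanios, PySem.List.mem_sorted]
    have hsel : (if anio_param ∈ anios then anio_param else PySem.List.pyGetD anios 0 "")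
        = (if (filas.foldl pvStep PySem.Dict.empty).contains anio_param then anio_param else PySem.List.pyGetD anios 0 "") := by
      by_cases hp : anio_param ∈ anios
      · simp [hp, hmem.mpr hp]
      · have hc : ¬ ((filas.foldl pvStep PySem.Dict.empty).contains anio_param = true) :=
          fun h => hp (hmem.mp h)
        simp [hp, hc]
    rw [hsel]
    set sel := (if (filas.foldl pvStep PySem.Dict.empty).contains anio_param then anio_param else PySem.List.pyGetD anios 0 "") with hseldef
    have hselkeys : sel ∈ (filas.foldl pvStep PySem.Dict.empty).keys := by
      rw [hkeys, ← PySem.List.mem_sorted _ (fun x : String => x) true, ← hanios]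
      rw [hseldef]
      split
      · exact hmem.mp (by assumption)
      · rw [PySem.List.pyGetD_zero]
        rcases List.exists_cons_of_ne_nil hnil with ⟨a, t, he⟩
        rw [he]; simp
    have hselne : sel ≠ "" := pvMem_keys_ne filas sel hselkeys
    have := pvGetD_foldl filas PySem.Dict.empty sel hselne
    simp only [PySem.Dict.getD_empty, List.nil_append] at this
    rw [this]
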